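-- pv_equiv track=rewrite | github.com/kevalrajpalknight/Mantis | tokenizer.py | find_ops
-- ===== SOURCE A (Python) =====
-- def find_ops(ops, segment):
--     separated = []
--     char_holder = ''
--     for char in segment:
--         if char in ops:
--             if char_holder:
--                 separated.append(char_holder)
--                 char_holder = ''
--             separated.append(char)
--         else:
--             char_holder += char
--     if char_holder:
--         separated.append(char_holder)
--
--     return separated
-- ===== SOURCE B (Python) =====
-- def find_ops(ops, segment):
--     # Run-scanning: operator chars are emitted one by one; a maximal run of
--     # non-operator chars is located with an inner scan and emitted as one slice.
--     tokens = []
--     i, n = 0, len(segment)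
--     while i < n:
--         if segment[i] in ops:
--             tokens.append(segment[i])
--             i += 1
--         else:
--             j = i + 1
--             while j < n and segment[j] not in ops:
--                 j += 1
--             tokens.append(segment[i:j])
--             i = j
--     return tokens
-- ===== Notes on version B (the rewrite author's own statement) =====
-- stated objective: alternative
-- what changed: Replaces A's single character-by-character pass with a pending-holder accumulator by an index-based run scanner: operator characters are emitted directly and each maximal non-operator run is located with an inner scan and emitted as one slice, so no token is ever built up incrementally.
import Mathlib
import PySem

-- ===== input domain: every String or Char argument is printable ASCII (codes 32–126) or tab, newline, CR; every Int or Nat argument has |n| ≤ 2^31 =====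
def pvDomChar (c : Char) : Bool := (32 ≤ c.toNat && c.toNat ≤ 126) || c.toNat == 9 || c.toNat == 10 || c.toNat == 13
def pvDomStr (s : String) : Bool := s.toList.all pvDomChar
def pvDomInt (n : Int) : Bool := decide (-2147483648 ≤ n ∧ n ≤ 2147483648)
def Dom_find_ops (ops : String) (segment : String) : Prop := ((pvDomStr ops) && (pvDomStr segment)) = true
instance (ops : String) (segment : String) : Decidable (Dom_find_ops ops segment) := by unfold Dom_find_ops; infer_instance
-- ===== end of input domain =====

-- B changes the decomposition: instead of A's single pass with a pending char_holder,
-- B scans maximal non-operator runs with an inner scan and slices them out whole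
-- (objective: alternative; same asymptotic cost).

-- ===== PORT A =====
-- A's for-loop over segment with state (separated, char_holder); 'char in ops' on a
-- single char is char membership, exact on this domain.
def findOpsLoopA (ops : List Char) (chars : List Char)
    (sep : List String) (hold : List Char) : List String :=
  match chars with
  | [] => if hold = [] then sep else sep ++ [String.mk hold]
  | c :: rest =>
    if ops.contains c then
      if hold = [] then findOpsLoopA ops rest (sep ++ [String.mk [c]]) []
      else findOpsLoopA ops rest (sep ++ [String.mk hold, String.mk [c]]) []
    else findOpsLoopA ops rest sep (hold ++ [c])

def find_ops (ops : String) (segment : String) : List String :=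
  findOpsLoopA ops.toList segment.toList [] []

-- ===== PORT B =====
-- B's outer while-loop: an operator char is emitted alone; otherwise the inner scan
-- (takeWhile) finds the maximal non-operator run, emitted as one slice.
def findOpsRunsB (ops : List Char) (chars : List Char) : List String :=
  match chars with
  | [] => []
  | c :: rest =>
    if ops.contains c then
      String.mk [c] :: findOpsRunsB ops rest
    else
      String.mk (c :: rest.takeWhile (fun d => ¬ ops.contains d)) ::
        findOpsRunsB ops (rest.dropWhile (fun d => ¬ ops.contains d))
termination_by chars.length
decreasing_by
  · simp
  · simpa using Nat.lt_succ_of_le (List.length_dropWhile_le _ rest)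

def find_ops_alt (ops : String) (segment : String) : List String :=
  findOpsRunsB ops.toList segment.toList

-- ===== PRECONDITION & SPEC =====
def Spec_find_ops (ops : String) (segment : String) (out : List String) : Prop := out = find_ops_alt ops segment
instance (ops : String) (segment : String) (out : List String) : Decidable (Spec_find_ops ops segment out) := by unfold Spec_find_ops; infer_instance

-- ===== CLAIM (what is proved, stated in full; the proofs are below) =====
def Claim_equal_find_ops : Prop := ∀ (ops : String) (segment : String), Dom_find_ops ops segment → Spec_find_ops ops segment (find_ops ops segment)

-- ===== LEMMAS AND PROOFS =====

-- B on an operator-headed list: the single-char token peels off.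
theorem runsB_op_cons (ops : List Char) (c : Char) (rest : List Char)
    (hc : c ∈ ops) :
    findOpsRunsB ops (c :: rest) = String.mk [c] :: findOpsRunsB ops rest := by
  rw [findOpsRunsB]
  simp [hc]

-- B on a list starting with a nonempty non-operator run followed by nothing or an
-- operator-headed tail: the run is one token.
theorem runsB_run_cons (ops : List Char) (c : Char) (hs rest : List Char)
    (hc : c ∉ ops)
    (hhs : ∀ d ∈ hs, d ∉ ops)
    (hrest : rest = [] ∨ ∃ e rest', rest = e :: rest' ∧ e ∈ ops) :
    findOpsRunsB ops ((c :: hs) ++ rest)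
      = String.mk (c :: hs) :: findOpsRunsB ops rest := by
  have htw : (hs ++ rest).takeWhile (fun d => ¬ ops.contains d) = hs ++
      rest.takeWhile (fun d => ¬ ops.contains d) :=
    List.takeWhile_append_of_pos (by intro a ha; simpa using hhs a ha)
  have hdw : (hs ++ rest).dropWhile (fun d => ¬ ops.contains d) =
      rest.dropWhile (fun d => ¬ ops.contains d) :=
    List.dropWhile_append_of_pos (by intro a ha; simpa using hhs a ha)
  have htwr : rest.takeWhile (fun d => ¬ ops.contains d) = [] := by
    rcases hrest with h | ⟨e, rest', he, hop⟩
    · simp [h]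
    · simp [he, hop]
  have hdwr : rest.dropWhile (fun d => ¬ ops.contains d) = rest := by
    rcases hrest with h | ⟨e, rest', he, hop⟩
    · simp [h]
    · simp [he, hop]
  rw [List.cons_append, findOpsRunsB, htw, htwr, hdw, hdwr]
  simp [hc]

-- Loop invariant for A: with pending non-operator holder `hold`, the loop returns
-- `sep` followed by B's tokenisation of `hold ++ chars`.
theorem loopA_eq_runsB (ops : List Char) (chars : List Char) :
    ∀ (sep : List String) (hold : List Char),
      (∀ d ∈ hold, d ∉ ops) →
      findOpsLoopA ops chars sep hold = sep ++ findOpsRunsB ops (hold ++ chars) := by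
  induction chars with
  | nil =>
    intro sep hold hhold
    rw [findOpsLoopA]
    cases hold with
    | nil => simp [findOpsRunsB]
    | cons h hs =>
      have := runsB_run_cons ops h hs [] (hhold h (by simp))
        (fun d hd => hhold d (by simp [hd])) (Or.inl rfl)
      simp at this ⊢
      simp [this, findOpsRunsB]
  | cons c rest ih =>
    intro sep hold hhold
    rw [findOpsLoopA]
    by_cases hc : c ∈ ops
    · cases hold with
      | nil =>
        rw [if_pos (by simpa using hc), if_pos rfl,
          ih (sep ++ [String.mk [c]]) [] (by simp)]
        simp [runsB_op_cons ops c rest hc]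
      | cons h hs =>
        rw [if_pos (by simpa using hc), if_neg (by simp),
          ih (sep ++ [String.mk (h :: hs), String.mk [c]]) [] (by simp)]
        have h1 := runsB_run_cons ops h hs (c :: rest) (hhold h (by simp))
          (fun d hd => hhold d (by simp [hd])) (Or.inr ⟨c, rest, rfl, hc⟩)
        simp only [List.nil_append, List.cons_append] at h1 ⊢
        rw [h1, runsB_op_cons ops c rest hc]
        simp
    · rw [if_neg (by simpa using hc),
        ih sep (hold ++ [c])
          (by intro d hd; rcases List.mem_append.mp hd with h | h
              · exact hhold d h
              · simpa [List.mem_singleton.mp h] using hc)]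
      simp

-- ===== VERDICT (by name: the statement is the Claim_ definition above) =====
theorem find_ops_spec : Claim_equal_find_ops := by
  intro ops segment _
  unfold Spec_find_ops find_ops find_ops_alt
  simpa using loopA_eq_runsB ops.toList segment.toList [] [] (by simp)
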